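-- pv_equiv track=rewrite | github.com/wanawin/startswith025 | core025_master_goal_lab__2026-04-17_v1.py | _repeat_shape
-- ===== SOURCE A (Python) =====
-- from collections import Counter
-- from typing import Dict, List, Optional, Sequence, Tuple
--
-- def _repeat_shape(digits: List[int]) -> str:
--     if any(d is None for d in digits): return "other"
--     counts = sorted(Counter(digits).values(), reverse=True)
--     if counts == [1,1,1,1]: return "all_unique"
--     if counts == [2,1,1]: return "one_pair"
--     if counts == [2,2]: return "two_pair"
--     if counts == [3,1]: return "triple"
--     if counts == [4]: return "quad"
--     return "other"
-- ===== SOURCE B (Python) =====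
-- def _repeat_shape(digits):
--     if any(d is None for d in digits): return "other"
--     if len(digits) != 4: return "other"
--     # count equal unordered pairs; a length-4 multiset has 0/1/2/3/6 of them
--     e = 0
--     for i, x in enumerate(digits):
--         e += digits[i+1:].count(x)
--     return {0: "all_unique", 1: "one_pair", 2: "two_pair",
--             3: "triple", 6: "quad"}.get(e, "other")
-- ===== Notes on version B (the rewrite author's own statement) =====
-- stated objective: alternative
-- what changed: Instead of building a Counter and comparing the reverse-sorted multiplicity list against five patterns, B counts the number of equal unordered index pairs (for each position, occurrences of that digit in the remaining suffix) and maps that count {0,1,2,3,6} to the shape via a lookup table, after an explicit len==4 guard.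
import Mathlib
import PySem

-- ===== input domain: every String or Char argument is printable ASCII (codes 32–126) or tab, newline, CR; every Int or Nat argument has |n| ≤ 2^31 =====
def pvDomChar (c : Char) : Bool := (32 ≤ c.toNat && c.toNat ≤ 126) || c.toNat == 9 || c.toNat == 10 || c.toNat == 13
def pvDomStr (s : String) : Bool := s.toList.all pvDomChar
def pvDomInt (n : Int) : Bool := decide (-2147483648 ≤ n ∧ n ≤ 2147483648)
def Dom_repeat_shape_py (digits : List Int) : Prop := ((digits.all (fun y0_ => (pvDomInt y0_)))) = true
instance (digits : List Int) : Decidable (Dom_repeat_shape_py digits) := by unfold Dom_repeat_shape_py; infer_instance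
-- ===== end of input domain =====

-- B replaces A's Counter + sorted-count-list equality chain by counting equal unordered index
-- pairs (one pass over suffix counts) and a table lookup on that number; objective: alternative.

-- ===== PORT A =====
-- 'any(d is None for d in digits)' is vacuously false for a List Int, so the guard is omitted.
def repeat_shape_py (digits : List Int) : String :=
  let counts := PySem.List.sorted (PySem.Dict.counter digits).values (fun x => x) true
  if counts = [1, 1, 1, 1] then "all_unique"
  else if counts = [2, 1, 1] then "one_pair"
  else if counts = [2, 2] then "two_pair"
  else if counts = [3, 1] then "triple"
  else if counts = [4] then "quad"
  else "other"

-- ===== PORT B =====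
-- the loop 'for i, x in enumerate(digits): e += digits[i+1:].count(x)' — at each position the
-- slice digits[i+1:] is the remaining tail, so the loop is this structural recursion.
def pvPairsB : List Int → Int
  | [] => 0
  | x :: t => (PySem.List.count t x : Int) + pvPairsB t

def pvTableB : PySem.Dict Int String :=
  PySem.Dict.ofList [(0, "all_unique"), (1, "one_pair"), (2, "two_pair"), (3, "triple"), (6, "quad")]

def repeat_shape_py_alt (digits : List Int) : String :=
  if digits.length ≠ 4 then "other"
  else PySem.Dict.getD pvTableB (pvPairsB digits) "other"

-- ===== PRECONDITION & SPEC =====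
def Spec_repeat_shape_py (digits : List Int) (out : String) : Prop := out = repeat_shape_py_alt digits
instance (digits : List Int) (out : String) : Decidable (Spec_repeat_shape_py digits out) := by unfold Spec_repeat_shape_py; infer_instance

-- ===== CLAIM (what is proved, stated in full; the proofs are below) =====
def Claim_equal_repeat_shape_py : Prop := ∀ (digits : List Int), Dom_repeat_shape_py digits → Spec_repeat_shape_py digits (repeat_shape_py digits)

-- ===== LEMMAS AND PROOFS =====

-- B's pair count equals the sum over distinct elements of C(multiplicity, 2).
theorem pairs_eq_sum_choose (l : List Int) :
    pvPairsB l = ∑ k ∈ l.toFinset, ((l.count k).choose 2 : Int) := by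
  induction l with
  | nil => simp [pvPairsB]
  | cons x t ih =>
    have hx : x ∈ (x :: t).toFinset := by simp
    rw [pvPairsB, PySem.List.count_eq, ih, ← Finset.add_sum_erase _ _ hx,
        List.toFinset_cons, Finset.erase_insert_eq_erase]
    have herase : ∑ k ∈ t.toFinset.erase x, (((x :: t).count k).choose 2 : Int)
        = ∑ k ∈ t.toFinset.erase x, ((t.count k).choose 2 : Int) := by
      refine Finset.sum_congr rfl fun k hk => ?_
      have hne : k ≠ x := Finset.ne_of_mem_erase hk
      simp [Ne.symm hne]
    rw [herase]
    have hcx : ((((x :: t).count x).choose 2 : Nat) : Int)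
        = ((t.count x).choose 2 : Int) + (t.count x : Int) := by
      rw [List.count_cons_self, Nat.choose_succ_succ, Nat.choose_one_right]
      push_cast; ring
    rw [hcx]
    by_cases hmem : x ∈ t.toFinset
    · rw [← Finset.add_sum_erase _ (fun k => ((t.count k).choose 2 : Int)) hmem]; ring
    · have h0 : t.count x = 0 := by
        simpa using (List.count_eq_zero).2 (by simpa using hmem)
      rw [Finset.erase_eq_of_notMem hmem, h0]; simp
-- Core combinatorics: for a descending list of positive integers summing to 4 (A's sorted
-- multiplicity list), A's five equality tests agree with B's table lookup on Σ C(m,2).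
theorem classify_key (s : List Int)
    (hsum : s.sum = 4) (hpos : ∀ x ∈ s, 1 ≤ x)
    (hdesc : s.Pairwise (fun a b => b ≤ a)) (hL1 : 1 ≤ s.length) (hL4 : s.length ≤ 4) :
    (if s = [1, 1, 1, 1] then "all_unique"
     else if s = [2, 1, 1] then "one_pair"
     else if s = [2, 2] then "two_pair"
     else if s = [3, 1] then "triple"
     else if s = [4] then "quad" else "other")
    = PySem.Dict.getD pvTableB ((s.map (fun m => (m.toNat.choose 2 : Int))).sum) "other" := by
  rcases s with _ | ⟨a, _ | ⟨b, _ | ⟨c, _ | ⟨d, _ | ⟨e, t⟩⟩⟩⟩⟩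
  · simp at hL1
  · simp at hsum; subst hsum; decide
  · simp [List.pairwise_cons] at hdesc hsum hpos
    have : (a = 3 ∧ b = 1) ∨ (a = 2 ∧ b = 2) := by omega
    rcases this with ⟨ha, hb⟩ | ⟨ha, hb⟩ <;> subst ha <;> subst hb <;> decide
  · simp [List.pairwise_cons] at hdesc hsum hpos
    obtain ⟨ha, hb, hc⟩ : a = 2 ∧ b = 1 ∧ c = 1 := by omega
    subst ha; subst hb; subst hc; decide
  · simp [List.pairwise_cons] at hdesc hsum hpos
    obtain ⟨ha, hb, hc, hd⟩ : a = 1 ∧ b = 1 ∧ c = 1 ∧ d = 1 := by omega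
    subst ha; subst hb; subst hc; subst hd; decide
  · simp at hL4; omega

-- The counter's values are the per-distinct-element counts, listed over the distinct elements.
theorem values_counter_eq (digits : List Int) :
    (PySem.Dict.counter (κ := Int) digits).values
      = (PySem.Set.ofList digits).map (fun k => (digits.count k : Int)) := by
  simp [PySem.Dict.values, PySem.Dict.items_counter, List.map_map]

-- The counts over the distinct elements sum to the length of the list.
theorem sum_counts (digits : List Int) :
    ((PySem.Set.ofList digits).map (fun k => (digits.count k : Int))).sum = (digits.length : Int) := by
  have hp : (PySem.Set.ofList digits).Perm digits.dedup := by
    apply (List.perm_ext_iff_of_nodup (PySem.Set.nodup_ofList digits) digits.nodup_dedup).2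
    intro x; simp [PySem.Set.mem_ofList, List.mem_dedup]
  rw [(hp.map _).sum_eq, ← List.sum_map_count_dedup_eq_length digits]
  push_cast
  rw [List.map_map]
  rfl

theorem main_eq (digits : List Int) : repeat_shape_py digits = repeat_shape_py_alt digits := by
  have hv := values_counter_eq digits
  set v := (PySem.Set.ofList digits).map (fun k => (digits.count k : Int)) with hvdef
  set s := PySem.List.sorted v (fun x => x) true with hsdef
  have hperm : s.Perm v := PySem.List.sorted_perm v (fun x => x) true
  have hsum : s.sum = (digits.length : Int) := by rw [hperm.sum_eq]; exact sum_counts digits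
  have hA : repeat_shape_py digits =
      (if s = [1, 1, 1, 1] then "all_unique"
       else if s = [2, 1, 1] then "one_pair"
       else if s = [2, 2] then "two_pair"
       else if s = [3, 1] then "triple"
       else if s = [4] then "quad" else "other") := by
    simp only [repeat_shape_py, hv, hsdef, hvdef]
  by_cases h4 : digits.length = 4
  · have hp : (PySem.Set.ofList digits).Perm digits.dedup := by
      apply (List.perm_ext_iff_of_nodup (PySem.Set.nodup_ofList digits) digits.nodup_dedup).2
      intro x; simp [PySem.Set.mem_ofList, List.mem_dedup]
    -- B's pair count equals the Σ C(m,2) taken over A's sorted count list s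
    have he : pvPairsB digits = (s.map (fun m => (m.toNat.choose 2 : Int))).sum := by
      rw [(hperm.map _).sum_eq, hvdef, List.map_map]
      have hmap : ((PySem.Set.ofList digits).map
            ((fun m : Int => (m.toNat.choose 2 : Int)) ∘ fun k => (digits.count k : Int)))
          = (PySem.Set.ofList digits).map (fun k => ((digits.count k).choose 2 : Int)) := by
        refine List.map_congr_left fun k _ => ?_
        simp [Function.comp]
      have hdf : digits.dedup.toFinset = digits.toFinset := by ext y; simp
      rw [hmap, (hp.map _).sum_eq, pairs_eq_sum_choose, ← hdf,
          List.sum_toFinset _ digits.nodup_dedup]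
    have hpos : ∀ x ∈ s, 1 ≤ x := by
      intro x hx
      rw [hperm.mem_iff, hvdef] at hx
      obtain ⟨k, hk, rfl⟩ := List.mem_map.1 hx
      have : k ∈ digits := (PySem.Set.mem_ofList _ _).1 hk
      have : 0 < digits.count k := List.count_pos_iff.2 this
      exact_mod_cast this
    have hdesc : s.Pairwise (fun a b => b ≤ a) :=
      PySem.List.sorted_pairwise_rev v (fun x => x)
    have hlen : s.length = (PySem.Set.ofList digits).length := by
      rw [hperm.length_eq, hvdef, List.length_map]
    have hne : digits ≠ [] := by intro h; rw [h] at h4; simp at h4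
    have hL1 : 1 ≤ s.length := by
      rw [hlen]
      have hx : digits.head hne ∈ PySem.Set.ofList digits :=
        (PySem.Set.mem_ofList _ _).2 (List.head_mem hne)
      have := List.ne_nil_of_mem hx
      have := List.length_pos_iff.2 this
      omega
    have hL4 : s.length ≤ 4 := by
      rw [hlen]
      have := PySem.Set.length_ofList_le digits
      omega
    rw [hA, classify_key s (by rw [hsum, h4]; norm_num) hpos hdesc hL1 hL4]
    simp [repeat_shape_py_alt, h4, he]
  · have hne4 : ∀ t : List Int, t.sum = 4 → s ≠ t := by
      intro t ht heq
      apply h4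
      rw [heq, ht] at hsum
      exact_mod_cast hsum.symm
    rw [hA, if_neg (hne4 _ (by norm_num)), if_neg (hne4 _ (by norm_num)),
        if_neg (hne4 _ (by norm_num)), if_neg (hne4 _ (by norm_num)),
        if_neg (hne4 _ (by norm_num))]
    simp [repeat_shape_py_alt, h4]

-- ===== VERDICT (by name: the statement is the Claim_ definition above) =====
theorem repeat_shape_py_spec : Claim_equal_repeat_shape_py := by
  intro digits _
  unfold Spec_repeat_shape_py
  exact main_eq digits
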